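-- pv_equiv track=rewrite | github.com/zingzincoachtay/rm_by_exif | diffexif.py | sametag
-- ===== SOURCE A (Python) =====
-- def sametag(M,x) :
--   N = len(M)
--   for m in range(0,N) :
--     for n in range(m,N) :
--       try : p = str(M[m][x])
--       except : return False
--       try : q = str(M[n][x])
--       except : return False
--       if p != q : return False
--   return True
-- ===== SOURCE B (Python) =====
-- def sametag(M, x):
--     try:
--         vals = [str(m[x]) for m in M]
--     except Exception:
--         return False
--     return len(set(vals)) <= 1
-- ===== Notes on version B (the rewrite author's own statement) =====
-- stated objective: simpler
-- what changed: Collect each row's string tag once into a list (failing fast on any bad index) and test that the set of distinct tags has at most one element, instead of A's nested quadratic pairwise comparison with per-pair re-indexing.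
import Mathlib
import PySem

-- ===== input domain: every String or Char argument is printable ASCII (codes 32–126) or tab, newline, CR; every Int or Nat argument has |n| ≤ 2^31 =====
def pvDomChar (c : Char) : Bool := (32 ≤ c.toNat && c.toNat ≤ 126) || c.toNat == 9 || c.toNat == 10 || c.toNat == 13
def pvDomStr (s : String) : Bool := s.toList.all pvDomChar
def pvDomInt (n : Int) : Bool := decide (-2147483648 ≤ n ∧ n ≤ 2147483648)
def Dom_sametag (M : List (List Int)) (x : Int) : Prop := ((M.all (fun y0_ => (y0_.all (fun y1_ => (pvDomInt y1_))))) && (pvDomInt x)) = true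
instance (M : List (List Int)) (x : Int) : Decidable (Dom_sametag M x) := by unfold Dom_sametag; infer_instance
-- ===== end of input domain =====

-- B collects each row's string tag once and checks the set of distinct tags has at most one
-- element (simpler, one pass), instead of A's nested pairwise comparison with per-pair re-indexing.


-- ===== PORT A =====
-- try: p = str(M[m][x]) — either index may raise (→ some false, i.e. early return False)
def tagAt (M : List (List Int)) (x m : Int) : Option String :=
  match PySem.List.pyGet? M m with
  | none => none
  | some row =>
    match PySem.List.pyGet? row x with
    | none => none
    | some v => some (PySem.Int.toStr v)

-- inner 'for n in range(m, N)': some b = early return b, none = loop fell through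
def innerLoop (M : List (List Int)) (x m : Int) : List Int → Option Bool
  | [] => none
  | n :: ns =>
    match tagAt M x m with
    | none => some false
    | some p =>
      match tagAt M x n with
      | none => some false
      | some q => if p ≠ q then some false else innerLoop M x m ns

-- outer 'for m in range(0, N)'
def outerLoop (M : List (List Int)) (x N : Int) : List Int → Bool
  | [] => true
  | m :: ms =>
    match innerLoop M x m (PySem.List.pyRange m N 1) with
    | some b => b
    | none => outerLoop M x N ms

def sametag (M : List (List Int)) (x : Int) : Bool :=
  outerLoop M x (M.length : Int) (PySem.List.pyRange 0 (M.length : Int) 1)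

-- ===== PORT B =====
-- vals = [str(m[x]) for m in M], with the whole comprehension aborting (none) on any IndexError
def collectTags (x : Int) : List (List Int) → Option (List String)
  | [] => some []
  | r :: rest =>
    match PySem.List.pyGet? r x with
    | none => none
    | some v => (collectTags x rest).map (PySem.Int.toStr v :: ·)

def sametag_alt (M : List (List Int)) (x : Int) : Bool :=
  match collectTags x M with
  | none => false
  | some vals => decide ((PySem.Set.ofList vals).length ≤ 1)

-- ===== PRECONDITION & SPEC =====
def Spec_sametag (M : List (List Int)) (x : Int) (out : Bool) : Prop := out = sametag_alt M x
instance (M : List (List Int)) (x : Int) (out : Bool) : Decidable (Spec_sametag M x out) := by unfold Spec_sametag; infer_instance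

-- ===== CLAIM (what is proved, stated in full; the proofs are below) =====
def Claim_equal_sametag : Prop := ∀ (M : List (List Int)) (x : Int), Dom_sametag M x → Spec_sametag M x (sametag M x)

-- ===== LEMMAS AND PROOFS =====

-- the tag of a single row, shared vocabulary of both characterisations
def tagf (x : Int) (r : List Int) : Option String :=
  (PySem.List.pyGet? r x).map PySem.Int.toStr

-- the common meaning: every row has a tag, and all tags agree
def Good (M : List (List Int)) (x : Int) : Prop :=
  (∀ r ∈ M, ∃ p, tagf x r = some p) ∧ (∀ r ∈ M, ∀ s ∈ M, tagf x r = tagf x s)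

theorem tagAt_eq (M : List (List Int)) (x : Int) (i : Nat) (h : i < M.length) :
    tagAt M x (i : Int) = tagf x M[i] := by
  simp [tagAt, tagf, PySem.List.pyGet?_ofNat M i h]
  cases PySem.List.pyGet? M[i] x <;> rfl

theorem innerLoop_ne_some_true (M : List (List Int)) (x m : Int) (l : List Int) :
    innerLoop M x m l ≠ some true := by
  induction l with
  | nil => simp [innerLoop]
  | cons n ns ih =>
    simp only [innerLoop]
    cases tagAt M x m with
    | none => simp
    | some p =>
      cases tagAt M x n with
      | none => simp
      | some q =>
        by_cases hpq : p ≠ q <;> simp [hpq, ih]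

theorem innerLoop_eq_none_iff (M : List (List Int)) (x m : Int) (l : List Int) :
    innerLoop M x m l = none ↔
      ∀ n ∈ l, ∃ p, tagAt M x m = some p ∧ tagAt M x n = some p := by
  induction l with
  | nil => simp [innerLoop]
  | cons n ns ih =>
    simp only [innerLoop]
    cases hm : tagAt M x m with
    | none =>
      constructor
      · intro h; exact absurd h (by simp)
      · intro h
        obtain ⟨p, hp, _⟩ := h n (by simp)
        exact absurd hp (by simp)
    | some p =>
      cases hn : tagAt M x n with
      | none =>
        constructor
        · intro h; exact absurd h (by simp)
        · intro h
          obtain ⟨p', _, hq'⟩ := h n (by simp)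
          rw [hn] at hq'; exact absurd hq' (by simp)
      | some q =>
        by_cases hpq : p ≠ q
        · simp only [if_pos hpq]
          constructor
          · intro h; exact absurd h (by simp)
          · intro h
            obtain ⟨p', hp', hq'⟩ := h n (by simp)
            rw [hn] at hq'
            exact absurd ((Option.some.inj hp').trans (Option.some.inj hq').symm) hpq
        · rw [not_not] at hpq
          subst hpq
          simp only [ne_eq, not_true_eq_false, if_false, ih]
          constructor
          · intro h n' hn'
            rcases List.mem_cons.mp hn' with rfl | hmem
            · exact ⟨p, rfl, hn⟩
            · obtain ⟨p', hp', hq'⟩ := h n' hmem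
              exact ⟨p', by rw [← hm, hp'], hq'⟩
          · intro h n' hn'
            obtain ⟨p', hp', hq'⟩ := h n' (List.mem_cons_of_mem _ hn')
            exact ⟨p', by rw [hm, hp'], hq'⟩

theorem outerLoop_eq_true_iff (M : List (List Int)) (x N : Int) (ms : List Int) :
    outerLoop M x N ms = true ↔
      ∀ m ∈ ms, innerLoop M x m (PySem.List.pyRange m N 1) = none := by
  induction ms with
  | nil => simp [outerLoop]
  | cons m rest ih =>
    simp only [outerLoop]
    cases hin : innerLoop M x m (PySem.List.pyRange m N 1) with
    | none =>
      rw [ih]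
      constructor
      · intro h m' hm'
        rcases List.mem_cons.mp hm' with rfl | hmem
        · exact hin
        · exact h m' hmem
      · intro h m' hm'
        exact h m' (List.mem_cons_of_mem _ hm')
    | some b =>
      cases b with
      | true => exact absurd hin (innerLoop_ne_some_true M x m _)
      | false => simp [hin]

theorem sametag_eq_true_iff (M : List (List Int)) (x : Int) :
    sametag M x = true ↔ Good M x := by
  unfold sametag
  rw [outerLoop_eq_true_iff]
  simp only [innerLoop_eq_none_iff, PySem.List.mem_pyRange_one]
  constructor
  · intro h
    constructor
    · intro r hr
      obtain ⟨i, hi, rfl⟩ := List.mem_iff_getElem.mp hr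
      obtain ⟨p, hp, _⟩ := h (i : Int) (by constructor <;> [positivity; exact_mod_cast hi])
        (i : Int) ⟨le_refl _, by exact_mod_cast hi⟩
      exact ⟨p, by rw [← tagAt_eq M x i hi]; exact hp⟩
    · intro r hr s hs
      obtain ⟨i, hi, rfl⟩ := List.mem_iff_getElem.mp hr
      obtain ⟨j, hj, rfl⟩ := List.mem_iff_getElem.mp hs
      rcases Nat.lt_or_ge j i with hij | hij
      · obtain ⟨p, hp, hq⟩ := h (j : Int) (by constructor <;> [positivity; exact_mod_cast hj])
          (i : Int) ⟨by exact_mod_cast hij.le, by exact_mod_cast hi⟩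
        rw [tagAt_eq M x j hj] at hp
        rw [tagAt_eq M x i hi] at hq
        rw [hp, hq]
      · obtain ⟨p, hp, hq⟩ := h (i : Int) (by constructor <;> [positivity; exact_mod_cast hi])
          (j : Int) ⟨by exact_mod_cast hij, by exact_mod_cast hj⟩
        rw [tagAt_eq M x i hi] at hp
        rw [tagAt_eq M x j hj] at hq
        rw [hp, hq]
  · rintro ⟨h1, h2⟩ m ⟨hm0, hmN⟩ n ⟨hnm, hnN⟩
    have hi : m.toNat < M.length := by omega
    have hj : n.toNat < M.length := by omega
    have hmc : ((m.toNat : Nat) : Int) = m := Int.toNat_of_nonneg hm0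
    have hnc : ((n.toNat : Nat) : Int) = n := Int.toNat_of_nonneg (by omega)
    obtain ⟨p, hp⟩ := h1 M[m.toNat] (List.getElem_mem hi)
    refine ⟨p, ?_, ?_⟩
    · rw [← hmc, tagAt_eq M x m.toNat hi]; exact hp
    · rw [← hnc, tagAt_eq M x n.toNat hj,
        h2 M[n.toNat] (List.getElem_mem hj) M[m.toNat] (List.getElem_mem hi)]
      exact hp

theorem collectTags_forall₂ (x : Int) (M : List (List Int)) (vals : List String)
    (h : collectTags x M = some vals) :
    List.Forall₂ (fun r v => tagf x r = some v) M vals := by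
  induction M generalizing vals with
  | nil => simp [collectTags] at h; subst h; exact List.Forall₂.nil
  | cons r rest ih =>
    simp only [collectTags] at h
    cases hr : PySem.List.pyGet? r x with
    | none => rw [hr] at h; exact absurd h (by simp)
    | some v =>
      rw [hr] at h
      cases hrest : collectTags x rest with
      | none => rw [hrest] at h; exact absurd h (by simp)
      | some vs =>
        rw [hrest] at h
        simp at h
        subst h
        exact List.Forall₂.cons (by simp [tagf, hr]) (ih vs hrest)

theorem collectTags_isSome (x : Int) (M : List (List Int))
    (h : ∀ r ∈ M, ∃ p, tagf x r = some p) : ∃ vals, collectTags x M = some vals := by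
  induction M with
  | nil => exact ⟨[], rfl⟩
  | cons r rest ih =>
    obtain ⟨p, hp⟩ := h r (by simp)
    obtain ⟨vs, hvs⟩ := ih (fun s hs => h s (List.mem_cons_of_mem _ hs))
    simp only [tagf] at hp
    cases hr : PySem.List.pyGet? r x with
    | none => rw [hr] at hp; exact absurd hp (by simp)
    | some v => exact ⟨PySem.Int.toStr v :: vs, by simp [collectTags, hr, hvs]⟩

theorem setLen_le_one_iff {α : Type} [BEq α] [LawfulBEq α] (l : List α) :
    (PySem.Set.ofList l).length ≤ 1 ↔ ∀ a ∈ l, ∀ b ∈ l, a = b := by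
  constructor
  · intro h a ha b hb
    rw [← PySem.Set.mem_ofList] at ha hb
    match hs : PySem.Set.ofList l, h' : h with
    | [], _ => rw [hs] at ha; simp at ha
    | [c], _ => rw [hs] at ha hb; simp at ha hb; rw [ha, hb]
  · intro h
    have hn := PySem.Set.nodup_ofList l
    match hs : PySem.Set.ofList l with
    | [] => simp
    | [c] => simp
    | a :: b :: rest =>
      exfalso
      have ha : a ∈ l := (PySem.Set.mem_ofList l a).mp (by rw [hs]; simp)
      have hb : b ∈ l := (PySem.Set.mem_ofList l b).mp (by rw [hs]; simp)
      rw [hs] at hn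
      exact (List.nodup_cons.mp hn).1 (by simp [h a ha b hb])

theorem forall₂_mem_left {α β : Type} {R : α → β → Prop} :
    ∀ {l1 : List α} {l2 : List β}, List.Forall₂ R l1 l2 → ∀ a ∈ l1, ∃ b ∈ l2, R a b
  | _, _, List.Forall₂.nil, a, ha => absurd ha (by simp)
  | _, _, List.Forall₂.cons hr hrest, a, ha => by
    rcases List.mem_cons.mp ha with rfl | hmem
    · exact ⟨_, by simp, hr⟩
    · obtain ⟨b, hb, hab⟩ := forall₂_mem_left hrest a hmem
      exact ⟨b, List.mem_cons_of_mem _ hb, hab⟩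

theorem forall₂_mem_right {α β : Type} {R : α → β → Prop} :
    ∀ {l1 : List α} {l2 : List β}, List.Forall₂ R l1 l2 → ∀ b ∈ l2, ∃ a ∈ l1, R a b
  | _, _, List.Forall₂.nil, b, hb => absurd hb (by simp)
  | _, _, List.Forall₂.cons hr hrest, b, hb => by
    rcases List.mem_cons.mp hb with rfl | hmem
    · exact ⟨_, by simp, hr⟩
    · obtain ⟨a, ha, hab⟩ := forall₂_mem_right hrest b hmem
      exact ⟨a, List.mem_cons_of_mem _ ha, hab⟩

theorem sametag_alt_eq_true_iff (M : List (List Int)) (x : Int) :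
    sametag_alt M x = true ↔ Good M x := by
  unfold sametag_alt
  cases hc : collectTags x M with
  | none =>
    simp only [Bool.false_eq_true, false_iff]
    rintro ⟨h1, _⟩
    obtain ⟨vals, hvals⟩ := collectTags_isSome x M h1
    rw [hc] at hvals; exact absurd hvals (by simp)
  | some vals =>
    have hF := collectTags_forall₂ x M vals hc
    rw [decide_eq_true_iff, setLen_le_one_iff]
    constructor
    · intro h
      constructor
      · intro r hr
        obtain ⟨v, _, hv⟩ := forall₂_mem_left hF r hr
        exact ⟨v, hv⟩
      · intro r hr s hs
        obtain ⟨v, hvmem, hv⟩ := forall₂_mem_left hF r hr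
        obtain ⟨w, hwmem, hw⟩ := forall₂_mem_left hF s hs
        rw [hv, hw, h v hvmem w hwmem]
    · rintro ⟨_, h2⟩ a ha b hb
      obtain ⟨r, hrmem, hr⟩ := forall₂_mem_right hF a ha
      obtain ⟨s, hsmem, hs⟩ := forall₂_mem_right hF b hb
      have := h2 r hrmem s hsmem
      rw [hr, hs] at this
      exact Option.some.inj this

-- ===== VERDICT (by name: the statement is the Claim_ definition above) =====
theorem sametag_spec : Claim_equal_sametag := by
  intro M x _
  unfold Spec_sametag
  rw [Bool.eq_iff_iff, sametag_eq_true_iff, sametag_alt_eq_true_iff]
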